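-- pv_equiv track=rewrite | github.com/metaslim/poc | agents/pattern_analysis_agent.py | _identify_dominant_theme
-- ===== SOURCE A (Python) =====
-- from typing import Dict, Any, Optional, List
--
-- def _identify_dominant_theme(patterns: List[Dict[str, Any]]) -> str:
--     """Identify the dominant psychological theme."""
--     themes = {
--         "emotional_control": ["emotional_trading", "revenge_trading", "panic_selling"],
--         "risk_management": ["ignoring_risk_management", "overleveraging", "liquidity_ignorance"],
--         "cognitive_bias": ["confirmation_bias", "anchoring_bias", "overconfidence"],
--         "discipline": ["fomo", "chasing_losses", "averaging_down", "overtrading"]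
--     }
--
--     theme_scores = {}
--     for theme, theme_patterns in themes.items():
--         score = sum(1 for p in patterns if p["pattern_name"] in theme_patterns)
--         theme_scores[theme] = score
--
--     return max(theme_scores, key=theme_scores.get) if theme_scores else "mixed"
-- ===== SOURCE B (Python) =====
-- def _identify_dominant_theme(patterns):
--     """Identify the dominant psychological theme (single pass, four counters)."""
--     g_emotional = ("emotional_trading", "revenge_trading", "panic_selling")
--     g_risk = ("ignoring_risk_management", "overleveraging", "liquidity_ignorance")
--     g_cognitive = ("confirmation_bias", "anchoring_bias", "overconfidence")
--     g_discipline = ("fomo", "chasing_losses", "averaging_down", "overtrading")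
--     e = r = c = d = 0
--     for p in patterns:
--         name = p["pattern_name"]
--         e += name in g_emotional
--         r += name in g_risk
--         c += name in g_cognitive
--         d += name in g_discipline
--     if e >= r and e >= c and e >= d:
--         return "emotional_control"
--     if r >= c and r >= d:
--         return "risk_management"
--     if c >= d:
--         return "cognitive_bias"
--     return "discipline"
-- ===== Notes on version B (the rewrite author's own statement) =====
-- stated objective: simpler
-- what changed: Replaces the four per-theme scans over patterns plus max(dict, key=...) with a single pass over patterns maintaining four integer counters and an explicit first-maximum if-chain in the original theme order.
import Mathlib
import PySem

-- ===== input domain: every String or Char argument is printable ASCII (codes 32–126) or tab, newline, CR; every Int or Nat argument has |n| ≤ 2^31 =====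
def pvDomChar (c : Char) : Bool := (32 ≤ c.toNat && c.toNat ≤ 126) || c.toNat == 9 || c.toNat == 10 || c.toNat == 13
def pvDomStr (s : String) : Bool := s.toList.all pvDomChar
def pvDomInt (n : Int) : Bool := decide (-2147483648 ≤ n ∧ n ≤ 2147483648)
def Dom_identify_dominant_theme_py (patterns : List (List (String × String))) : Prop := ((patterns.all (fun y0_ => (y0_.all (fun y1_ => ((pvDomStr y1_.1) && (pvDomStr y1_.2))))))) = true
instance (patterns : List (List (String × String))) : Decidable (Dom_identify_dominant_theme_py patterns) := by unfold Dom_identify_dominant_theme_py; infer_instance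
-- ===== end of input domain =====

-- B replaces A's four per-theme scans over patterns + max(dict, key=...) with one pass over patterns
-- keeping four integer counters and an explicit first-maximum if-chain in the same theme order
-- (objective: simpler).

-- p["pattern_name"]: first-match lookup in the association list; Python raises KeyError when the key
-- is absent — those inputs are excluded by Pre_ below, so the `.getD ""` totalisation is never hit
-- on admitted inputs.
def pvName (p : List (String × String)) : String := (p.lookup "pattern_name").getD ""

-- ===== PORT A =====
-- the dict literal `themes` has four distinct literal keys; iterating its .items() in insertion
-- order is exactly iterating this list of pairs
def pvThemesA : List (String × List String) :=
  [("emotional_control", ["emotional_trading", "revenge_trading", "panic_selling"]),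
   ("risk_management", ["ignoring_risk_management", "overleveraging", "liquidity_ignorance"]),
   ("cognitive_bias", ["confirmation_bias", "anchoring_bias", "overconfidence"]),
   ("discipline", ["fomo", "chasing_losses", "averaging_down", "overtrading"])]

-- max(theme_scores, key=theme_scores.get): first key with maximal score; the key function is ported
-- as getD _ 0, exact here because every key iterated over is present in theme_scores
def identify_dominant_theme_py (patterns : List (List (String × String))) : String :=
  let theme_scores : PySem.Dict String Int :=
    pvThemesA.foldl
      (fun d tp =>
        d.insert tp.1 (patterns.foldl (fun s p => s + if pvName p ∈ tp.2 then 1 else 0) 0))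
      PySem.Dict.empty
  if theme_scores.size ≠ 0 then
    (PySem.List.max? theme_scores.keys (fun k => theme_scores.getD k 0)).getD "mixed"
  else "mixed"

-- ===== PORT B =====
def pvGE : List String := ["emotional_trading", "revenge_trading", "panic_selling"]
def pvGR : List String := ["ignoring_risk_management", "overleveraging", "liquidity_ignorance"]
def pvGC : List String := ["confirmation_bias", "anchoring_bias", "overconfidence"]
def pvGD : List String := ["fomo", "chasing_losses", "averaging_down", "overtrading"]

def identify_dominant_theme_py_alt (patterns : List (List (String × String))) : String :=
  let st : Int × Int × Int × Int :=
    patterns.foldl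
      (fun s p =>
        let name := pvName p
        (s.1 + (if name ∈ pvGE then 1 else 0),
         s.2.1 + (if name ∈ pvGR then 1 else 0),
         s.2.2.1 + (if name ∈ pvGC then 1 else 0),
         s.2.2.2 + (if name ∈ pvGD then 1 else 0)))
      (0, 0, 0, 0)
  if st.1 ≥ st.2.1 ∧ st.1 ≥ st.2.2.1 ∧ st.1 ≥ st.2.2.2 then "emotional_control"
  else if st.2.1 ≥ st.2.2.1 ∧ st.2.1 ≥ st.2.2.2 then "risk_management"
  else if st.2.2.1 ≥ st.2.2.2 then "cognitive_bias"
  else "discipline"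

-- ===== PRECONDITION & SPEC =====
-- Pre_ excludes exactly the inputs where some pattern dict lacks the key "pattern_name",
-- on which the Python A raises KeyError.
def Pre_identify_dominant_theme_py (patterns : List (List (String × String))) : Prop :=
  (patterns.all (fun p => p.any (fun kv => kv.1 == "pattern_name"))) = true
instance (patterns : List (List (String × String))) : Decidable (Pre_identify_dominant_theme_py patterns) := by unfold Pre_identify_dominant_theme_py; infer_instance

def pvWitness_identify_dominant_theme_py : (List (List (String × String))) :=
  [[("pattern_name", "fomo")], [("pattern_name", "overleveraging"), ("note", "x")]]

def Spec_identify_dominant_theme_py (patterns : List (List (String × String))) (out : String) : Prop := out = identify_dominant_theme_py_alt patterns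
instance (patterns : List (List (String × String))) (out : String) : Decidable (Spec_identify_dominant_theme_py patterns out) := by unfold Spec_identify_dominant_theme_py; infer_instance

-- ===== CLAIM (what is proved, stated in full; the proofs are below) =====
def Claim_equal_identify_dominant_theme_py : Prop := ∀ (patterns : List (List (String × String))), Dom_identify_dominant_theme_py patterns → Pre_identify_dominant_theme_py patterns → Spec_identify_dominant_theme_py patterns (identify_dominant_theme_py patterns)

-- ===== LEMMAS AND PROOFS =====

-- B's single fold with four independent counters is the quadruple of A's four per-theme sums
theorem pv_foldB (l : List (List (String × String))) (s : Int × Int × Int × Int) :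
    l.foldl
      (fun s p =>
        let name := pvName p
        (s.1 + (if name ∈ pvGE then 1 else 0),
         s.2.1 + (if name ∈ pvGR then 1 else 0),
         s.2.2.1 + (if name ∈ pvGC then 1 else 0),
         s.2.2.2 + (if name ∈ pvGD then 1 else 0))) s
    = (s.1 + l.foldl (fun a p => a + if pvName p ∈ pvGE then 1 else 0) 0,
       s.2.1 + l.foldl (fun a p => a + if pvName p ∈ pvGR then 1 else 0) 0,
       s.2.2.1 + l.foldl (fun a p => a + if pvName p ∈ pvGC then 1 else 0) 0,
       s.2.2.2 + l.foldl (fun a p => a + if pvName p ∈ pvGD then 1 else 0) 0) := by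
  induction l generalizing s with
  | nil => simp [List.foldl]
  | cons p t ih =>
    simp only [List.foldl, ih, PySem.List.foldl_add]
    obtain ⟨a, b, c, d⟩ := s
    refine Prod.ext ?_ (Prod.ext ?_ (Prod.ext ?_ ?_)) <;> dsimp only <;> ring
theorem pv_getD (e r c d : Int) (k : String) :
   (((((PySem.Dict.empty.insert "emotional_control" e).insert "risk_management" r).insert
          "cognitive_bias" c).insert "discipline" d : PySem.Dict String Int)).getD k 0
      = (if k = "emotional_control" then e else if k = "risk_management" then r
          else if k = "cognitive_bias" then c else if k = "discipline" then d else 0) := by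
  by_cases h1 : k = "emotional_control"
  · subst h1; simp [PySem.Dict.empty, PySem.Dict.insert, PySem.Dict.getD, PySem.Dict.get?]
  by_cases h2 : k = "risk_management"
  · subst h2; simp [PySem.Dict.empty, PySem.Dict.insert, PySem.Dict.getD, PySem.Dict.get?]
  by_cases h3 : k = "cognitive_bias"
  · subst h3; simp [PySem.Dict.empty, PySem.Dict.insert, PySem.Dict.getD, PySem.Dict.get?]
  by_cases h4 : k = "discipline"
  · subst h4; simp [PySem.Dict.empty, PySem.Dict.insert, PySem.Dict.getD, PySem.Dict.get?]
  · have b1 : ("emotional_control" == k) = false := by simp [Ne.symm h1]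
    have b2 : ("risk_management" == k) = false := by simp [Ne.symm h2]
    have b3 : ("cognitive_bias" == k) = false := by simp [Ne.symm h3]
    have b4 : ("discipline" == k) = false := by simp [Ne.symm h4]
    simp [PySem.Dict.empty, PySem.Dict.insert, PySem.Dict.getD, PySem.Dict.get?,
      h1, h2, h3, h4, b1, b2, b3, b4]

theorem pv_pick (e r c d : Int) :
    (if (((((PySem.Dict.empty.insert "emotional_control" e).insert "risk_management" r).insert
          "cognitive_bias" c).insert "discipline" d : PySem.Dict String Int)).size ≠ 0 then
       (PySem.List.max?
         (((((PySem.Dict.empty.insert "emotional_control" e).insert "risk_management" r).insert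
          "cognitive_bias" c).insert "discipline" d : PySem.Dict String Int)).keys
         (fun k => (((((PySem.Dict.empty.insert "emotional_control" e).insert "risk_management" r).insert
          "cognitive_bias" c).insert "discipline" d : PySem.Dict String Int)).getD k 0)).getD "mixed"
     else "mixed")
    = (if e ≥ r ∧ e ≥ c ∧ e ≥ d then "emotional_control"
       else if r ≥ c ∧ r ≥ d then "risk_management"
       else if c ≥ d then "cognitive_bias"
       else "discipline") := by
  have hk : (((((PySem.Dict.empty.insert "emotional_control" e).insert "risk_management" r).insert
          "cognitive_bias" c).insert "discipline" d : PySem.Dict String Int)).keys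
      = ["emotional_control", "risk_management", "cognitive_bias", "discipline"] := by
    simp [PySem.Dict.empty, PySem.Dict.insert, PySem.Dict.keys]
  have hsz : (((((PySem.Dict.empty.insert "emotional_control" e).insert "risk_management" r).insert
          "cognitive_bias" c).insert "discipline" d : PySem.Dict String Int)).size = 4 := by
    simp [PySem.Dict.empty, PySem.Dict.insert, PySem.Dict.size]
  have hfun : (fun k => (((((PySem.Dict.empty.insert "emotional_control" e).insert "risk_management" r).insert
          "cognitive_bias" c).insert "discipline" d : PySem.Dict String Int)).getD k 0)
      = (fun k => if k = "emotional_control" then e else if k = "risk_management" then r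
          else if k = "cognitive_bias" then c else if k = "discipline" then d else 0) :=
    funext (pv_getD e r c d)
  rw [hk, hsz, hfun]
  simp only [PySem.List.max?, List.foldl]
  by_cases h1 : e < r
  · by_cases h2 : r < c
    · by_cases h3 : c < d
      · simp [h1, h2, h3] <;> split_ifs <;> first | rfl | omega
      · simp [h1, h2, h3] <;> split_ifs <;> first | rfl | omega
    · by_cases h3 : r < d
      · simp [h1, h2, h3] <;> split_ifs <;> first | rfl | omega
      · simp [h1, h2, h3] <;> split_ifs <;> first | rfl | omega
  · by_cases h2 : e < c
    · by_cases h3 : c < d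
      · simp [h1, h2, h3] <;> split_ifs <;> first | rfl | omega
      · simp [h1, h2, h3] <;> split_ifs <;> first | rfl | omega
    · by_cases h3 : e < d
      · simp [h1, h2, h3] <;> split_ifs <;> first | rfl | omega
      · simp [h1, h2, h3] <;> split_ifs <;> first | rfl | omega

-- ===== VERDICT (by name: the statement is the Claim_ definition above) =====
theorem identify_dominant_theme_py_spec : Claim_equal_identify_dominant_theme_py := by
  intro patterns _ _
  unfold Spec_identify_dominant_theme_py
  unfold identify_dominant_theme_py identify_dominant_theme_py_alt
  rw [pv_foldB]
  simp only [pvThemesA, pvGE, pvGR, pvGC, pvGD, List.foldl, zero_add]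
  rw [pv_pick]
  rfl
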